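-- pv_equiv track=rewrite | github.com/kimjjing1004/Python_Programmers | 2022-06-21/직사각형별찍기/solution1_피드백.py | solution
-- ===== SOURCE A (Python) =====
-- def solution(n, m):
--     answer = []
--
--     for i in range(m):
--         temp = ''
--         for j in range(n):
--             temp += '*'
--         answer.append(temp)
--
--     result = ''
--     for i in answer:
--         result += i + '\n'
--
--     return result
-- ===== SOURCE B (Python) =====
-- def solution(n, m):
--     if m <= 0:
--         return ''
--     return ('*' * n + '\n') * m
-- ===== Notes on version B (the rewrite author's own statement) =====
-- stated objective: simpler
-- what changed: Replaces A's two loops (per-character row building, then newline-joining accumulation) with the single closed-form string expression ('*'*n + '\n')*m.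
import Mathlib
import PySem

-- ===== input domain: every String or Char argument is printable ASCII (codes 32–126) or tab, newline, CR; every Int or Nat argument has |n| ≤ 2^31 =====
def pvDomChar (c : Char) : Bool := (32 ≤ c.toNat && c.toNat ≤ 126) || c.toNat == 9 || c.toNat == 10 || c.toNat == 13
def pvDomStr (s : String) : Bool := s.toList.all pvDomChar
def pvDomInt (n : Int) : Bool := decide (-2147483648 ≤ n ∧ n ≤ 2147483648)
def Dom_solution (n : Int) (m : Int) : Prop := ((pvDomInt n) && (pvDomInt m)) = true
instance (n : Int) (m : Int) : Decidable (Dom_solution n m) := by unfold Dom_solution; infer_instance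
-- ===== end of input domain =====

-- B replaces A's two accumulation loops with the closed-form ('*'*n + '\n')*m (simpler).

-- ===== PORT A =====
def solution (n : Int) (m : Int) : String :=
  let answer : List (List Char) :=
    (PySem.List.pyRange 0 m 1).foldl
      (fun acc _ =>
        acc ++ [(PySem.List.pyRange 0 n 1).foldl (fun temp _ => temp ++ ['*']) []]) []
  let result : List Char := answer.foldl (fun r i => r ++ i ++ ['\n']) []
  String.ofList result

-- ===== PORT B =====
def solution_alt (n : Int) (m : Int) : String :=
  if m ≤ 0 then ""
  else String.ofList (PySem.List.pyRepeat (PySem.List.pyRepeat ['*'] n ++ ['\n']) m)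

-- ===== PRECONDITION & SPEC =====
def Spec_solution (n : Int) (m : Int) (out : String) : Prop := out = solution_alt n m
instance (n : Int) (m : Int) (out : String) : Decidable (Spec_solution n m out) := by unfold Spec_solution; infer_instance

-- ===== CLAIM (what is proved, stated in full; the proofs are below) =====
def Claim_equal_solution : Prop := ∀ (n : Int) (m : Int), Dom_solution n m → Spec_solution n m (solution n m)

-- ===== LEMMAS AND PROOFS =====

-- A loop that appends a fixed element once per iteration builds a replicate.
theorem pv_foldl_snoc_const {α β : Type} (l : List β) (x : α) (init : List α) :
    l.foldl (fun acc _ => acc ++ [x]) init = init ++ List.replicate l.length x := by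
  induction l generalizing init with
  | nil => simp
  | cons h t ih =>
    rw [List.foldl_cons, ih]
    simp [List.replicate_succ]

-- A loop appending each row plus a suffix builds the flatten of the mapped list.
theorem pv_foldl_join {α : Type} (l : List (List α)) (s init : List α) :
    l.foldl (fun r i => r ++ i ++ s) init = init ++ (l.map (· ++ s)).flatten := by
  induction l generalizing init with
  | nil => simp
  | cons h t ih => simp only [List.foldl_cons, ih]; simp

-- ===== VERDICT (by name: the statement is the Claim_ definition above) =====
theorem solution_spec : Claim_equal_solution := by
  intro n m _
  unfold Spec_solution solution solution_alt
  simp only [pv_foldl_snoc_const, pv_foldl_join]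
  rcases le_or_gt m 0 with hm | hm
  · have h0 : PySem.List.pyRange 0 m 1 = [] := by
      simp [PySem.List.pyRange_one]
      omega
    simp [hm, h0]
  · simp [not_le.mpr hm, PySem.List.pyRepeat, PySem.List.length_pyRange_one, List.map_replicate]
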